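-- pv_equiv track=rewrite | github.com/davidydu/Claw4S | submissions/ballet-sync/src/kuramoto.py | _hierarchical
-- ===== SOURCE A (Python) =====
-- def _hierarchical(n, positions, **kwargs):
--     """Principal (0) -> soloists (1,2) -> corps (3..n-1)."""
--     adj = {i: [] for i in range(n)}
--     # Principal connects to soloists
--     n_soloists = min(2, n - 1)
--     for s in range(1, n_soloists + 1):
--         adj[0].append(s)
--         adj[s].append(0)
--
--     # Distribute corps among soloists
--     corps = list(range(n_soloists + 1, n))
--     for idx, c in enumerate(corps):
--         soloist = 1 + (idx % n_soloists)
--         adj[soloist].append(c)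
--         adj[c].append(soloist)
--
--     return adj
-- ===== SOURCE B (Python) =====
-- def _hierarchical(n, positions, **kwargs):
--     """Principal (0) -> soloists -> corps: each node's full neighbor list in closed form."""
--     ns = min(2, n - 1)
--
--     def neighbors(i):
--         if i == 0:
--             return list(range(1, ns + 1))
--         if i <= ns:
--             return [0] + list(range(ns + i, n, ns))
--         return [1 + (i - ns - 1) % ns]
--
--     return {i: neighbors(i) for i in range(n)}
-- ===== Notes on version B (the rewrite author's own statement) =====
-- stated objective: alternative
-- what changed: Instead of A's incremental edge-append loops (soloist loop plus enumerate-indexed corps loop mutating two lists per edge), B computes every node's complete adjacency list in closed form (node 0: range of soloists; soloist s: [0] plus the stepped range(ns+s, n, ns) of its corps; corps c: its single parent) and builds the dict by a comprehension.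
import Mathlib
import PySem

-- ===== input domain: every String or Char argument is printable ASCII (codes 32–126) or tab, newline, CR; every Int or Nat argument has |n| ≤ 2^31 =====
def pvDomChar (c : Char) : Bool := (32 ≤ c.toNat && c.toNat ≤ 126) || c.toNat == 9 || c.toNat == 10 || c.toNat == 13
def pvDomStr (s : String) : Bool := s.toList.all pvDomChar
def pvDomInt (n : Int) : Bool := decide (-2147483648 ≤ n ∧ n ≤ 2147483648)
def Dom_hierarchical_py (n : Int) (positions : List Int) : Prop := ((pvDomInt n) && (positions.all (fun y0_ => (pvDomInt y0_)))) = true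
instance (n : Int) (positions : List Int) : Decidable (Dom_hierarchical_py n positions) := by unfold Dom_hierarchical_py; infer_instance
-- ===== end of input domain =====

-- B replaces A's incremental edge-append loops by a closed-form neighbor list per node
-- (node 0: the soloist range; soloist s: [0] plus the stepped range of its corps; corps c: its parent),
-- built with a dict comprehension (objective: alternative).

-- ===== PORT A =====
def hierarchical_py (n : Int) (positions : List Int) : List (Int × List Int) :=
  let adj : PySem.Dict Int (List Int) :=
    (PySem.List.pyRange 0 n 1).foldl (fun d i => d.insert i []) PySem.Dict.empty
  let nSoloists := min 2 (n - 1)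
  let adj := (PySem.List.pyRange 1 (nSoloists + 1) 1).foldl
    (fun d s => (d.modify 0 [] (· ++ [s])).modify s [] (· ++ [0])) adj
  let corps := PySem.List.pyRange (nSoloists + 1) n 1
  let adj := (PySem.List.enumerate corps 0).foldl
    (fun d p =>
      let soloist := 1 + PySem.Int.mod p.1 nSoloists
      (d.modify soloist [] (· ++ [p.2])).modify p.2 [] (· ++ [soloist])) adj
  adj.items

-- ===== PORT B =====
-- closed-form neighbor list of node i (Python helper 'neighbors')
def altNb (n ns i : Int) : List Int :=
  if i = 0 then PySem.List.pyRange 1 (ns + 1) 1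
  else if i ≤ ns then [0] ++ PySem.List.pyRange (ns + i) n ns
  else [1 + PySem.Int.mod (i - ns - 1) ns]

def hierarchical_py_alt (n : Int) (positions : List Int) : List (Int × List Int) :=
  let ns := min 2 (n - 1)
  ((PySem.List.pyRange 0 n 1).foldl
    (fun d i => d.insert i (altNb n ns i)) PySem.Dict.empty).items

-- ===== PRECONDITION & SPEC =====
def Spec_hierarchical_py (n : Int) (positions : List Int) (out : List (Int × List Int)) : Prop := out = hierarchical_py_alt n positions
instance (n : Int) (positions : List Int) (out : List (Int × List Int)) : Decidable (Spec_hierarchical_py n positions out) := by unfold Spec_hierarchical_py; infer_instance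

-- ===== CLAIM =====
def Claim_equal_hierarchical_py : Prop := ∀ (n : Int) (positions : List Int), Dom_hierarchical_py n positions → Spec_hierarchical_py n positions (hierarchical_py n positions)

-- ===== LEMMAS AND PROOFS =====

-- proof-only shorthands for A's pipeline
def nsf (n : Int) : Int := min 2 (n - 1)

def A0d (n : Int) : PySem.Dict Int (List Int) :=
  (PySem.List.pyRange 0 n 1).foldl (fun d i => d.insert i []) PySem.Dict.empty

def solFold (n : Int) : PySem.Dict Int (List Int) :=
  (PySem.List.pyRange 1 (nsf n + 1) 1).foldl
    (fun d s => (d.modify 0 [] (· ++ [s])).modify s [] (· ++ [0])) (A0d n)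

def corpsFold (n : Int) : PySem.Dict Int (List Int) :=
  (PySem.List.enumerate (PySem.List.pyRange (nsf n + 1) n 1) 0).foldl
    (fun d p =>
      let soloist := 1 + PySem.Int.mod p.1 (nsf n)
      (d.modify soloist [] (· ++ [p.2])).modify p.2 [] (· ++ [soloist])) (solFold n)

def parOf (ns c : Int) : Int := 1 + PySem.Int.mod (c - ns - 1) ns

def L1 (n : Int) : List (Int × Int) :=
  (PySem.List.pyRange 1 (nsf n + 1) 1).flatMap (fun s => [(0, s), (s, 0)])

def L2 (n : Int) : List (Int × Int) :=
  (PySem.List.pyRange (nsf n + 1) n 1).flatMap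
    (fun c => [(parOf (nsf n) c, c), (c, parOf (nsf n) c)])

theorem A_eq (n : Int) (positions : List Int) :
    hierarchical_py n positions = (corpsFold n).items := rfl

-- enumerate over a unit-step range is the range with the index recovered from the value
theorem enum_pyRange : ∀ (len : Nat) (a b s : Int), (b - a).toNat = len →
    PySem.List.enumerate (PySem.List.pyRange a b 1) s
      = (PySem.List.pyRange a b 1).map (fun c => (s + (c - a), c)) := by
  intro len
  induction len with
  | zero =>
    intro a b s h
    rw [PySem.List.pyRange_one_eq_nil (by omega)]
    simp [PySem.List.enumerate]
  | succ m ih =>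
    intro a b s h
    rw [PySem.List.pyRange_one_cons (by omega), PySem.List.enumerate_cons, List.map_cons,
      ih (a + 1) b (s + 1) (by omega)]
    refine congrArg₂ _ (by simp) ?_
    apply List.map_congr_left
    intro c hc
    have := (PySem.List.mem_pyRange_one).1 hc
    refine congrArg₂ _ (by omega) rfl

theorem flatMap_single {α β : Type} (l : List α) (f : α → β) :
    l.flatMap (fun x => [f x]) = l.map f := by
  induction l with
  | nil => simp
  | cons a t ih => simp [ih]

theorem flatMap_ite_not_mem {α β : Type} [DecidableEq α] (l : List α) (k : α) (v : List β)
    (hk : k ∉ l) : l.flatMap (fun x => if x = k then v else []) = [] := by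
  induction l with
  | nil => simp
  | cons a t ih =>
    simp only [List.mem_cons, not_or] at hk
    rw [List.flatMap_cons, if_neg (fun h => hk.1 h.symm), List.nil_append, ih hk.2]

theorem flatMap_ite_mem {α β : Type} [DecidableEq α] (l : List α) (k : α) (v : List β)
    (hnd : l.Nodup) (hk : k ∈ l) : l.flatMap (fun x => if x = k then v else []) = v := by
  induction l with
  | nil => simp at hk
  | cons a t ih =>
    rcases List.mem_cons.1 hk with h | h
    · subst h
      have : k ∉ t := (List.nodup_cons.1 hnd).1
      simp [List.flatMap_cons, flatMap_ite_not_mem t k v this]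
    · have hne : a ≠ k := by
        rintro rfl; exact (List.nodup_cons.1 hnd).1 h
      simp [List.flatMap_cons, hne, ih (List.nodup_cons.1 hnd).2 h]

theorem flatMap_ite_eq_filter {α : Type} (p : α → Prop) [DecidablePred p] (l : List α) :
    l.flatMap (fun c => if p c then [c] else []) = l.filter (fun c => decide (p c)) := by
  induction l with
  | nil => simp
  | cons a t ih =>
    by_cases h : p a <;> simp [List.flatMap_cons, h, ih]

theorem flatMap_congr_mem {α β : Type} {l : List α} {f g : α → List β}
    (h : ∀ a ∈ l, f a = g a) : l.flatMap f = l.flatMap g := by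
  induction l with
  | nil => rfl
  | cons a t ih =>
    simp only [List.flatMap_cons, h a (by simp)]
    rw [ih (fun x hx => h x (by simp [hx]))]

theorem set_update_id {s : List Int} : ∀ (xs : List Int), (∀ x ∈ xs, x ∈ s) →
    PySem.Set.update s xs = s := by
  intro xs
  induction xs with
  | nil => intro _; rfl
  | cons a t ih =>
    intro h
    have ha : a ∈ s := h a (by simp)
    have hadd : PySem.Set.add s a = s := by simp [PySem.Set.add, ha]
    show PySem.Set.update s (a :: t) = s
    simp only [PySem.Set.update, List.foldl_cons, hadd]
    exact ih (fun x hx => h x (by simp [hx]))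

-- step-2 ranges: nil and cons forms
theorem r2nil {a b : Int} (h : b ≤ a) : PySem.List.pyRange a b 2 = [] := by
  rw [PySem.List.pyRange_of_pos a b (by norm_num)]
  simp [if_neg (by omega : ¬ a < b)]

theorem r2cons {a b : Int} (h : a < b) :
    PySem.List.pyRange a b 2 = a :: PySem.List.pyRange (a + 2) b 2 := by
  rw [PySem.List.pyRange_of_pos a b (by norm_num), PySem.List.pyRange_of_pos (a + 2) b (by norm_num)]
  have hcnt : (if a < b then ((b - a + 2 - 1) / 2).toNat else 0)
      = (if a + 2 < b then ((b - (a + 2) + 2 - 1) / 2).toNat else 0) + 1 := by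
    by_cases h2 : a + 2 < b <;> simp [h, h2] <;> omega
  rw [hcnt, List.range_succ_eq_map]
  simp only [List.map_cons, List.map_map]
  refine congrArg₂ _ (by omega) ?_
  apply List.map_congr_left
  intro k _
  simp only [Function.comp]
  push_cast
  ring

-- parity filter over a unit range is a step-2 range (the ns = 2 case)
theorem filter_parity (k : Int) (hk : k = 1 ∨ k = 2) : ∀ (len : Nat) (a b : Int),
    (b - a).toNat = len →
    (PySem.List.pyRange a b 1).filter (fun c => decide (1 + (c - 3) % 2 = k))
      = PySem.List.pyRange (if 1 + (a - 3) % 2 = k then a else a + 1) b 2 := by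
  intro len
  induction len with
  | zero =>
    intro a b h
    rw [PySem.List.pyRange_one_eq_nil (by omega)]
    rw [r2nil (by split <;> omega)]
    simp
  | succ m ih =>
    intro a b h
    have hab : a < b := by omega
    have hbm : (b - (a + 1)).toNat = m := by omega
    rw [PySem.List.pyRange_one_cons hab, List.filter_cons, ih (a + 1) b hbm]
    by_cases hpa : 1 + (a - 3) % 2 = k
    · have hnext : ¬ (1 + (a + 1 - 3) % 2 = k) := by rcases hk with hk | hk <;> omega
      simp only [hpa, hnext, decide_true, if_true, if_false]
      rw [r2cons hab, show a + 1 + 1 = a + 2 from by ring]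
    · have hnext : 1 + (a + 1 - 3) % 2 = k := by rcases hk with hk | hk <;> omega
      simp [hpa, hnext]

-- every modify key of A lies in range(n), so the key list is unchanged
theorem L1_keys_mem (n : Int) : ∀ x ∈ (L1 n).map Prod.fst, x ∈ PySem.List.pyRange 0 n 1 := by
  intro x hx
  simp only [L1, List.map_flatMap, List.mem_flatMap] at hx
  obtain ⟨s, hs, hx⟩ := hx
  have hs' := PySem.List.mem_pyRange_one.1 hs
  unfold nsf at hs'
  rw [PySem.List.mem_pyRange_one]
  simp at hx
  rcases hx with rfl | rfl <;> omega

-- a nonempty corps range forces n ≥ 3 and hence exactly two soloists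
theorem ns_two_of_corps {n c : Int} (h : nsf n + 1 ≤ c ∧ c < n) : nsf n = 2 := by
  unfold nsf at h ⊢; omega

theorem par_bounds (c : Int) : 1 ≤ parOf 2 c ∧ parOf 2 c ≤ 2 := by
  unfold parOf
  rw [PySem.Int.mod_eq_emod_of_pos (by norm_num : (0:Int) < 2)]
  omega

theorem L2_keys_mem (n : Int) : ∀ x ∈ (L2 n).map Prod.fst, x ∈ PySem.List.pyRange 0 n 1 := by
  intro x hx
  simp only [L2, List.map_flatMap, List.mem_flatMap] at hx
  obtain ⟨c, hc, hx⟩ := hx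
  have hc' := PySem.List.mem_pyRange_one.1 hc
  have h2 := ns_two_of_corps hc'
  have hp := par_bounds c
  rw [h2] at hx
  unfold nsf at hc'
  rw [PySem.List.mem_pyRange_one]
  simp at hx
  rcases hx with rfl | rfl <;> omega

-- A's initial dict
theorem A0items (n : Int) :
    (A0d n).items = (PySem.List.pyRange 0 n 1).map (fun i => (i, ([] : List Int))) := by
  unfold A0d
  have h := PySem.Dict.items_foldl_insert_fresh (PySem.List.pyRange 0 n 1)
    (fun i => i) (fun _ => ([] : List Int)) PySem.Dict.empty
    (by intro a _; simp [PySem.Dict.contains_empty])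
    (by simpa using PySem.List.nodup_pyRange_one (a := 0) (b := n))
  simpa using h

theorem A0keys (n : Int) : (A0d n).keys = PySem.List.pyRange 0 n 1 := by
  show (A0d n).items.map Prod.fst = _
  rw [A0items n, List.map_map]
  exact List.map_id _

theorem A0getD (n k : Int) (hk : k ∈ PySem.List.pyRange 0 n 1) : (A0d n).getD k [] = [] := by
  refine PySem.Dict.getD_of_mem_items (A0d n) ?_ ?_ []
  · rw [A0items n]
    exact List.mem_map.2 ⟨k, hk, rfl⟩
  · rw [A0keys n]
    exact PySem.List.nodup_pyRange_one 0 n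

theorem solFold_eq (n : Int) :
    solFold n = (L1 n).foldl (fun d p => d.modify p.1 [] fun x => x ++ [p.2]) (A0d n) := by
  unfold solFold L1
  simp only [List.foldl_flatMap, List.foldl_cons, List.foldl_nil]

theorem corpsFold_eq (n : Int) :
    corpsFold n = (L2 n).foldl (fun d p => d.modify p.1 [] fun x => x ++ [p.2]) (solFold n) := by
  unfold corpsFold L2
  rw [enum_pyRange ((n - (nsf n + 1)).toNat) (nsf n + 1) n 0 rfl, List.foldl_map]
  simp only [List.foldl_flatMap, List.foldl_cons, List.foldl_nil]
  apply PySem.List.foldl_congr_mem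
  intro acc c _
  show (acc.modify (1 + PySem.Int.mod (0 + (c - (nsf n + 1))) (nsf n)) [] (· ++ [c])).modify
      c [] (· ++ [1 + PySem.Int.mod (0 + (c - (nsf n + 1))) (nsf n)]) = _
  rw [show 0 + (c - (nsf n + 1)) = c - nsf n - 1 from by ring]
  rfl

theorem getD_corpsFold (n k : Int) :
    (corpsFold n).getD k []
      = (A0d n).getD k []
        ++ ((L1 n).filter (fun p => p.1 == k)).map (fun p => p.2)
        ++ ((L2 n).filter (fun p => p.1 == k)).map (fun p => p.2) := by
  rw [corpsFold_eq, PySem.Dict.getD_foldl_modify_append, solFold_eq,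
    PySem.Dict.getD_foldl_modify_append]

theorem keysCF (n : Int) : (corpsFold n).keys = PySem.List.pyRange 0 n 1 := by
  rw [corpsFold_eq, solFold_eq,
    PySem.Dict.keys_foldl_modify_key (L2 n) Prod.fst [] (fun _ p => (· ++ [p.2])),
    PySem.Dict.keys_foldl_modify_key (L1 n) Prod.fst [] (fun _ p => (· ++ [p.2])),
    A0keys n, set_update_id _ (L1_keys_mem n), set_update_id _ (L2_keys_mem n)]

theorem Bitems (n ns : Int) :
    ((PySem.List.pyRange 0 n 1).foldl
        (fun d i => d.insert i (altNb n ns i)) PySem.Dict.empty).items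
      = (PySem.List.pyRange 0 n 1).map (fun i => (i, altNb n ns i)) := by
  have h := PySem.Dict.items_foldl_insert_fresh (PySem.List.pyRange 0 n 1)
    (fun i => i) (fun i => altNb n ns i) PySem.Dict.empty
    (by intro a _; simp [PySem.Dict.contains_empty])
    (by simpa using PySem.List.nodup_pyRange_one 0 n)
  simpa using h

theorem F1_zero (n : Int) :
    ((L1 n).filter (fun p => p.1 == (0:Int))).map (fun p => p.2)
      = PySem.List.pyRange 1 (nsf n + 1) 1 := by
  unfold L1
  rw [List.filter_flatMap]
  have hcg : ∀ s ∈ PySem.List.pyRange 1 (nsf n + 1) 1,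
      [((0:Int), s), (s, 0)].filter (fun p => p.1 == (0:Int)) = [((0:Int), s)] := by
    intro s hs
    have hs' := PySem.List.mem_pyRange_one.1 hs
    have hne : s ≠ 0 := by omega
    simp [hne]
  rw [flatMap_congr_mem hcg, flatMap_single, List.map_map]
  exact List.map_id _

theorem F2_zero (n : Int) :
    ((L2 n).filter (fun p => p.1 == (0:Int))).map (fun p => p.2) = [] := by
  unfold L2
  rw [List.filter_flatMap]
  have hcg : ∀ c ∈ PySem.List.pyRange (nsf n + 1) n 1,
      [(parOf (nsf n) c, c), (c, parOf (nsf n) c)].filter (fun p => p.1 == (0:Int)) = [] := by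
    intro c hc
    have hc' := PySem.List.mem_pyRange_one.1 hc
    have h2 := ns_two_of_corps hc'
    have hp := par_bounds c
    rw [h2]
    have h1 : parOf 2 c ≠ 0 := by omega
    have h0 : c ≠ 0 := by rw [h2] at hc'; omega
    simp [h1, h0]
  rw [flatMap_congr_mem hcg]
  simp

theorem F1_sol (n k : Int) (hk1 : 1 ≤ k) (hk2 : k ≤ nsf n) :
    ((L1 n).filter (fun p => p.1 == k)).map (fun p => p.2) = [0] := by
  unfold L1
  rw [List.filter_flatMap]
  have hcg : ∀ s ∈ PySem.List.pyRange 1 (nsf n + 1) 1,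
      [((0:Int), s), (s, 0)].filter (fun p => p.1 == k)
        = if s = k then [(k, (0:Int))] else [] := by
    intro s _
    have h0 : (0:Int) ≠ k := by omega
    by_cases hsk : s = k
    · subst hsk; simp [h0]
    · simp [h0, hsk]
  rw [flatMap_congr_mem hcg,
    flatMap_ite_mem _ k _ (PySem.List.nodup_pyRange_one 1 (nsf n + 1))
      (PySem.List.mem_pyRange_one.2 ⟨by omega, by omega⟩)]
  rfl

theorem F2_sol (n k : Int) (hk1 : 1 ≤ k) (hk2 : k ≤ nsf n) :
    ((L2 n).filter (fun p => p.1 == k)).map (fun p => p.2)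
      = PySem.List.pyRange (nsf n + k) n (nsf n) := by
  by_cases hco : n ≤ nsf n + 1
  · unfold L2
    rw [PySem.List.pyRange_one_eq_nil hco]
    have hns : nsf n = 1 ∨ nsf n = 2 := by unfold nsf at hk2 ⊢; omega
    rcases hns with h | h <;> rw [h] at hco ⊢
    · simp
      exact PySem.List.pyRange_one_eq_nil (by omega)
    · simp
      exact r2nil (by omega)
  · rw [not_le] at hco
    have h2 : nsf n = 2 := by unfold nsf at hco ⊢; omega
    rw [h2] at hk2
    unfold L2
    rw [h2]
    rw [List.filter_flatMap, List.map_flatMap]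
    have hcg : ∀ c ∈ PySem.List.pyRange (2 + 1) n 1,
        ([(parOf 2 c, c), (c, parOf 2 c)].filter (fun p => p.1 == k)).map (fun p => p.2)
          = if parOf 2 c = k then [c] else [] := by
      intro c hc
      have hc' := PySem.List.mem_pyRange_one.1 hc
      have hck : c ≠ k := by omega
      by_cases hpk : parOf 2 c = k
      · simp [hpk, hck]
      · simp [hpk, hck]
    rw [flatMap_congr_mem hcg, flatMap_ite_eq_filter (fun c => parOf 2 c = k)]
    have hfc : (PySem.List.pyRange (2 + 1) n 1).filter (fun c => decide (parOf 2 c = k))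
        = (PySem.List.pyRange 3 n 1).filter (fun c => decide (1 + (c - 3) % 2 = k)) := by
      rw [show (2 + 1 : Int) = 3 from by norm_num]
      apply List.filter_congr
      intro c _
      unfold parOf
      rw [PySem.Int.mod_eq_emod_of_pos (by norm_num : (0:Int) < 2),
        show c - 2 - 1 = c - 3 from by ring]
    rw [hfc, filter_parity k (by omega) ((n - 3).toNat) 3 n rfl]
    rcases (by omega : k = 1 ∨ k = 2) with rfl | rfl
    · rw [if_pos (by norm_num)]
      norm_num
    · rw [if_neg (by norm_num)]
      norm_num

theorem F1_corps (n k : Int) (hk2 : nsf n < k) :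
    ((L1 n).filter (fun p => p.1 == k)).map (fun p => p.2) = [] := by
  unfold L1
  rw [List.filter_flatMap]
  have hcg : ∀ s ∈ PySem.List.pyRange 1 (nsf n + 1) 1,
      [((0:Int), s), (s, 0)].filter (fun p => p.1 == k) = [] := by
    intro s hs
    have hs' := PySem.List.mem_pyRange_one.1 hs
    have h0 : (0:Int) ≠ k := by omega
    have hsk : s ≠ k := by omega
    simp [h0, hsk]
  rw [flatMap_congr_mem hcg]
  simp

theorem F2_corps (n k : Int) (hk : nsf n + 1 ≤ k ∧ k < n) :
    ((L2 n).filter (fun p => p.1 == k)).map (fun p => p.2) = [parOf (nsf n) k] := by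
  have h2 := ns_two_of_corps hk
  unfold L2
  rw [h2] at hk ⊢
  have hcg : ∀ c ∈ PySem.List.pyRange (2 + 1) n 1,
      [(parOf 2 c, c), (c, parOf 2 c)].filter (fun p => p.1 == k)
        = if c = k then [(k, parOf 2 k)] else [] := by
    intro c _
    have hp := par_bounds c
    have hpk : parOf 2 c ≠ k := by omega
    by_cases hck : c = k
    · subst hck; simp [hpk]
    · simp [hpk, hck]
  rw [List.filter_flatMap, flatMap_congr_mem hcg,
    flatMap_ite_mem _ k _ (PySem.List.nodup_pyRange_one (2 + 1) n)
      (PySem.List.mem_pyRange_one.2 ⟨hk.1, hk.2⟩)]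
  rfl

theorem main_eq (n : Int) (positions : List Int) :
    hierarchical_py n positions = hierarchical_py_alt n positions := by
  rw [A_eq n positions]
  show (corpsFold n).items
      = ((PySem.List.pyRange 0 n 1).foldl
          (fun d i => d.insert i (altNb n (nsf n) i)) PySem.Dict.empty).items
  rw [Bitems n (nsf n),
    PySem.Dict.items_eq_map_keys (corpsFold n)
      (by rw [keysCF n]; exact PySem.List.nodup_pyRange_one 0 n) [],
    keysCF n]
  apply List.map_congr_left
  intro k hk
  have hk' := PySem.List.mem_pyRange_one.1 hk
  have hg := getD_corpsFold n k
  rw [A0getD n k hk] at hg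
  simp only [List.nil_append] at hg
  by_cases hk0 : k = 0
  · subst hk0
    rw [hg, F1_zero n, F2_zero n]
    simp [altNb]
  · by_cases hks : k ≤ nsf n
    · have hk1 : 1 ≤ k := by omega
      rw [hg, F1_sol n k hk1 hks, F2_sol n k hk1 hks]
      simp [altNb, hk0, hks]
    · rw [hg, F1_corps n k (by omega), F2_corps n k ⟨by omega, hk'.2⟩]
      simp [altNb, parOf, hk0, hks]

-- ===== VERDICT =====
theorem hierarchical_py_spec : Claim_equal_hierarchical_py := by
  intro n positions _
  unfold Spec_hierarchical_py
  exact main_eq n positions
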